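-- pv_equiv track=rewrite | github.com/mshafqats/HackerEarth | Basic Programming/Implementation/Basics of Implementation/The Alphabet Chocolate.py | solve
-- ===== SOURCE A (Python) =====
-- def solve(s):
--     n = len(s)
--     vowel = "aeiouAEIOU"
--     ans = 0
--     for i, c in enumerate(s):
--         if c in vowel:
--             ans += (i + 1) * (n - i)
--     return ans
-- ===== SOURCE B (Python) =====
-- def solve(s):
--     vowel = "aeiouAEIOU"
--     running = 0
--     ans = 0
--     for i, c in enumerate(s):
--         if c in vowel:
--             running += i + 1
--         ans += running
--     return ans
-- ===== Notes on version B (the rewrite author's own statement) =====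
-- stated objective: alternative
-- what changed: Replaces the per-vowel closed-form contribution (i+1)*(n-i) by an incremental running prefix-contribution accumulator added on every iteration, so the length n is never needed.
import Mathlib
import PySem

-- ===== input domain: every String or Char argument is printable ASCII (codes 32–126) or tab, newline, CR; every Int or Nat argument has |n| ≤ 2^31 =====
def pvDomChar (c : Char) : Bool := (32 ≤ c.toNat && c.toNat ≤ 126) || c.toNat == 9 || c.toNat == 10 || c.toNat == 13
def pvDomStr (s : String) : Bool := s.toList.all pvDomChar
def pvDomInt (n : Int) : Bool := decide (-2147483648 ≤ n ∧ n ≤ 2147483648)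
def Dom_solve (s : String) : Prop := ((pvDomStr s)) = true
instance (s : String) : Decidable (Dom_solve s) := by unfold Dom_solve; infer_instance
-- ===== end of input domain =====

-- B replaces A's closed-form per-vowel contribution (i+1)*(n-i) by a running accumulator added every step (alternative decomposition, same O(n) cost).

-- ===== PORT A =====
def solve (s : String) : Int :=
  let n : Int := (s.toList.length : Int)
  (PySem.List.enumerate s.toList 0).foldl
    (fun ans ic =>
      if ("aeiouAEIOU".toList.contains ic.2) then ans + (ic.1 + 1) * (n - ic.1) else ans) 0

-- ===== PORT B =====
def solve_alt (s : String) : Int :=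
  ((PySem.List.enumerate s.toList 0).foldl
    (fun p ic =>
      let r := if ("aeiouAEIOU".toList.contains ic.2) then p.1 + (ic.1 + 1) else p.1
      (r, p.2 + r)) ((0 : Int), (0 : Int))).2

-- ===== PRECONDITION & SPEC =====
def Spec_solve (s : String) (out : Int) : Prop := out = solve_alt s
instance (s : String) (out : Int) : Decidable (Spec_solve s out) := by unfold Spec_solve; infer_instance

-- ===== CLAIM (what is proved, stated in full; the proofs are below) =====
def Claim_equal_solve : Prop := ∀ (s : String), Dom_solve s → Spec_solve s (solve s)

-- ===== LEMMAS AND PROOFS =====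

-- A's fold shifts over its accumulator
theorem foldA_acc (n : Int) (l : List Char) (k a : Int) :
    (PySem.List.enumerate l k).foldl
      (fun ans ic =>
        if ("aeiouAEIOU".toList.contains ic.2) then ans + (ic.1 + 1) * (n - ic.1) else ans) a
    = a + (PySem.List.enumerate l k).foldl
      (fun ans ic =>
        if ("aeiouAEIOU".toList.contains ic.2) then ans + (ic.1 + 1) * (n - ic.1) else ans) 0 := by
  induction l generalizing k a with
  | nil => simp [PySem.List.enumerate_nil]
  | cons c t ih =>
    simp only [PySem.List.enumerate_cons, List.foldl_cons]
    by_cases h : ("aeiouAEIOU".toList.contains c)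
    · simp only [h, if_true]
      rw [ih (k + 1) (a + (k + 1) * (n - k)), ih (k + 1) (0 + (k + 1) * (n - k))]
      ring
    · simp only [h, Bool.false_eq_true, if_false]
      rw [ih (k + 1) a]

-- main invariant: B's answer, started at index k with running r and answer a,
-- equals A's fold (with total length n = k + l.length) plus a and r spread over the
-- remaining l.length iterations.
theorem main_inv (l : List Char) (k r a : Int) :
    (((PySem.List.enumerate l k).foldl
      (fun p ic =>
        (if ("aeiouAEIOU".toList.contains ic.2) then p.1 + (ic.1 + 1) else p.1,
         p.2 + if ("aeiouAEIOU".toList.contains ic.2) then p.1 + (ic.1 + 1) else p.1)) (r, a)).2)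
    = (PySem.List.enumerate l k).foldl
      (fun ans ic =>
        if ("aeiouAEIOU".toList.contains ic.2) then ans + (ic.1 + 1) * ((k + (l.length : Int)) - ic.1) else ans) a
      + r * (l.length : Int) := by
  induction l generalizing k r a with
  | nil => simp [PySem.List.enumerate_nil]
  | cons c t ih =>
    simp only [PySem.List.enumerate_cons, List.foldl_cons, List.length_cons]
    have hn : (k + ((t.length + 1 : Nat) : Int)) = ((k + 1) + (t.length : Int)) := by
      push_cast; ring
    by_cases h : ("aeiouAEIOU".toList.contains c)
    · simp only [h, if_true]
      rw [ih (k + 1) (r + (k + 1)) (a + (r + (k + 1)))]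
      rw [foldA_acc _ t (k + 1) (a + (r + (k + 1)))]
      rw [foldA_acc _ t (k + 1) (a + (k + 1) * (k + ((t.length + 1 : Nat) : Int) - k))]
      simp only [hn]
      push_cast
      ring
    · simp only [h, Bool.false_eq_true, if_false]
      rw [ih (k + 1) r (a + r), foldA_acc _ t (k + 1) (a + r), foldA_acc _ t (k + 1) a]
      simp only [hn]
      push_cast
      ring

-- ===== VERDICT (by name: the statement is the Claim_ definition above) =====
theorem solve_spec : Claim_equal_solve := by
  intro s _hd
  unfold Spec_solve
  have h : solve_alt s
      = (PySem.List.enumerate s.toList 0).foldl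
          (fun ans ic =>
            if ("aeiouAEIOU".toList.contains ic.2) then ans + (ic.1 + 1) * ((0 + (s.toList.length : Int)) - ic.1) else ans) 0
        + 0 * (s.toList.length : Int) := main_inv s.toList 0 0 0
  rw [h]
  unfold solve
  simp
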